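-- pv_equiv track=rewrite | github.com/Avicennasis/NiimPrintX | NiimPrintX/ui/component/FontList.py | parse_font_details
-- ===== SOURCE A (Python) =====
-- def parse_font_details(output: str) -> list[dict[str, str]]:
--     font_details: list[dict[str, str]] = []
--     font: dict[str, str] = {}
--     for line in output.splitlines():
--         if line.startswith("  Font:"):
--             if font:
--                 font_details.append(font)
--                 font = {}
--             font["name"] = line.split(":", 1)[1].strip()
--         elif line.startswith("    family:"):
--             font["family"] = line.split(":", 1)[1].strip()
--         elif line.startswith("    style:"):
--             font["style"] = line.split(":", 1)[1].strip()
--         elif line.startswith("    stretch:"):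
--             font["stretch"] = line.split(":", 1)[1].strip()
--         elif line.startswith("    weight:"):
--             font["weight"] = line.split(":", 1)[1].strip()
--         elif line.startswith("    glyphs:"):
--             font["glyphs"] = line.split(":", 1)[1].strip()
--     if font:
--         font_details.append(font)
--     return font_details
-- ===== SOURCE B (Python) =====
-- FIELD_TABLE = [
--     ("    family:", "family"),
--     ("    style:", "style"),
--     ("    stretch:", "stretch"),
--     ("    weight:", "weight"),
--     ("    glyphs:", "glyphs"),
-- ]
--
--
-- def parse_font_details(output: str) -> list[dict[str, str]]:
--     # Phase 1: split the lines into record groups, starting a new group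
--     # at every "  Font:" line (the leading group holds any orphan lines).
--     groups: list[list[str]] = []
--     current: list[str] = []
--     for line in output.splitlines():
--         if line.startswith("  Font:"):
--             groups.append(current)
--             current = [line]
--         else:
--             current.append(line)
--     groups.append(current)
--     # Phase 2: turn each group into a record dict; keep only non-empty ones.
--     result: list[dict[str, str]] = []
--     for group in groups:
--         record: dict[str, str] = {}
--         for line in group:
--             if line.startswith("  Font:"):
--                 record["name"] = line.split(":", 1)[1].strip()
--             else:
--                 for prefix, key in FIELD_TABLE:
--                     if line.startswith(prefix):
--                         record[key] = line.split(":", 1)[1].strip()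
--                         break
--         if record:
--             result.append(record)
--     return result
-- ===== Notes on version B (the rewrite author's own statement) =====
-- stated objective: alternative
-- what changed: A's single interleaved loop (accumulator dict flushed at each Font line) is replaced by a two-phase pass: first split the lines into record groups at every ' Font:' line, then map each group to a dict via a prefix->key table, keeping only non-empty records.
import Mathlib
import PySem

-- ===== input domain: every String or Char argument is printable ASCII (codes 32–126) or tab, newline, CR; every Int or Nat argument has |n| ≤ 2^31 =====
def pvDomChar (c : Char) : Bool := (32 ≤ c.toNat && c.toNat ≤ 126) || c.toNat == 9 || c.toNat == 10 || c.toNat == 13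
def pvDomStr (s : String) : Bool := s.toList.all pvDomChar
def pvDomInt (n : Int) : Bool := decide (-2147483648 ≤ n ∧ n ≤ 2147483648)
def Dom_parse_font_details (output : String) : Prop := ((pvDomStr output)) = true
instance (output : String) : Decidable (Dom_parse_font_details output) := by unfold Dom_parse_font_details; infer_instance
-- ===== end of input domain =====

-- B re-implements A's single interleaved accumulator loop as a two-phase group-then-map pass
-- (split lines into record groups at every "  Font:" line, then build each record); objective: alternative decomposition, same cost.

-- value after the first ':' on the line, stripped (= line.split(":", 1)[1].strip();
-- guarded by a startswith check containing ':', so the .getD "" default is never taken)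
def pvColonVal (line : String) : String :=
  PySem.Str.strip (((PySem.Str.splitMax? line ":" 1).bind (fun ps => PySem.List.pyGet? ps 1)).getD "")

-- ===== PORT A =====
-- one iteration of A's loop over (font_details, font)
def pvAStep (s : List (PySem.Dict String String) × PySem.Dict String String) (line : String) :
    List (PySem.Dict String String) × PySem.Dict String String :=
  if PySem.Str.startswith line "  Font:" then
    ((if s.2.items = [] then s.1 else s.1 ++ [s.2]),
     (PySem.Dict.empty : PySem.Dict String String).insert "name" (pvColonVal line))
  else if PySem.Str.startswith line "    family:" then (s.1, s.2.insert "family" (pvColonVal line))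
  else if PySem.Str.startswith line "    style:" then (s.1, s.2.insert "style" (pvColonVal line))
  else if PySem.Str.startswith line "    stretch:" then (s.1, s.2.insert "stretch" (pvColonVal line))
  else if PySem.Str.startswith line "    weight:" then (s.1, s.2.insert "weight" (pvColonVal line))
  else if PySem.Str.startswith line "    glyphs:" then (s.1, s.2.insert "glyphs" (pvColonVal line))
  else s

def parse_font_details (output : String) : List (List (String × String)) :=
  let r := (PySem.Str.splitlines output).foldl pvAStep ([], PySem.Dict.empty)
  (if r.2.items = [] then r.1 else r.1 ++ [r.2]).map (·.items)

-- ===== PORT B =====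
def pvBTable : List (String × String) :=
  [("    family:", "family"), ("    style:", "style"), ("    stretch:", "stretch"),
   ("    weight:", "weight"), ("    glyphs:", "glyphs")]

-- phase 1 step: start a new group at a "  Font:" line
def pvBGroupStep (s : List (List String) × List String) (line : String) :
    List (List String) × List String :=
  if PySem.Str.startswith line "  Font:" then (s.1 ++ [s.2], [line]) else (s.1, s.2 ++ [line])

-- inner 'for prefix, key in FIELD_TABLE: … break' loop
def pvBTableLoop (table : List (String × String)) (line : String)
    (d : PySem.Dict String String) : PySem.Dict String String :=
  match table with
  | [] => d
  | (p, k) :: rest =>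
      if PySem.Str.startswith line p then d.insert k (pvColonVal line)
      else pvBTableLoop rest line d

-- phase 2: one line of a group into the record
def pvBLineStep (d : PySem.Dict String String) (line : String) : PySem.Dict String String :=
  if PySem.Str.startswith line "  Font:" then d.insert "name" (pvColonVal line)
  else pvBTableLoop pvBTable line d

def pvBRecord (group : List String) : PySem.Dict String String :=
  group.foldl pvBLineStep PySem.Dict.empty

-- phase-2 result loop of B
def pvBPhase2 (groups : List (List String)) : List (PySem.Dict String String) :=
  groups.foldl (fun res grp => if (pvBRecord grp).items = [] then res else res ++ [pvBRecord grp]) []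

def parse_font_details_alt (output : String) : List (List (String × String)) :=
  let g := (PySem.Str.splitlines output).foldl pvBGroupStep ([], [])
  (pvBPhase2 (g.1 ++ [g.2])).map (·.items)

-- ===== PRECONDITION & SPEC =====
def Spec_parse_font_details (output : String) (out : List (List (String × String))) : Prop := out = parse_font_details_alt output
instance (output : String) (out : List (List (String × String))) : Decidable (Spec_parse_font_details output out) := by unfold Spec_parse_font_details; infer_instance

-- ===== CLAIM (what is proved, stated in full; the proofs are below) =====
def Claim_equal_parse_font_details : Prop := ∀ (output : String), Dom_parse_font_details output → Spec_parse_font_details output (parse_font_details output)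

-- ===== LEMMAS AND PROOFS =====

-- [d] if non-empty, else [] (Python's truthiness append)
def pvEmit (d : PySem.Dict String String) : List (PySem.Dict String String) :=
  if d.items = [] then [] else [d]

-- abstract record stream: process lines with pending record d, emitting at group boundaries
def pvProc (d : PySem.Dict String String) : List String → List (PySem.Dict String String)
  | [] => pvEmit d
  | l :: rest =>
      if PySem.Str.startswith l "  Font:" then
        pvEmit d ++ pvProc ((PySem.Dict.empty : PySem.Dict String String).insert "name" (pvColonVal l)) rest
      else pvProc (pvBLineStep d l) rest

lemma pvAStep_nonfont (acc : List (PySem.Dict String String)) (d : PySem.Dict String String)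
    (l : String) (h : ¬ PySem.Str.startswith l "  Font:" = true) :
    pvAStep (acc, d) l = (acc, pvBLineStep d l) := by
  simp only [pvAStep, pvBLineStep, pvBTableLoop, pvBTable, if_neg h]
  split_ifs <;> rfl

lemma pvA_loop (lines : List String) :
    ∀ (acc : List (PySem.Dict String String)) (d : PySem.Dict String String),
    (let r := lines.foldl pvAStep (acc, d)
     if r.2.items = [] then r.1 else r.1 ++ [r.2]) = acc ++ pvProc d lines := by
  induction lines with
  | nil => intro acc d; simp [pvProc, pvEmit]; split_ifs <;> simp
  | cons l rest ih =>
      intro acc d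
      by_cases h : PySem.Str.startswith l "  Font:" = true
      · have hstep : pvAStep (acc, d) l =
            (acc ++ pvEmit d,
             (PySem.Dict.empty : PySem.Dict String String).insert "name" (pvColonVal l)) := by
          simp only [pvAStep, if_pos h, pvEmit]
          split_ifs <;> simp
        simp only [List.foldl_cons, hstep, ih, pvProc, if_pos h, List.append_assoc]
      · simp only [List.foldl_cons, pvProc, if_neg h, pvAStep_nonfont acc d l h, ih]

lemma pvBPhase2_append (gs : List (List String)) (c : List String) :
    pvBPhase2 (gs ++ [c]) = pvBPhase2 gs ++ pvEmit (pvBRecord c) := by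
  simp only [pvBPhase2, List.foldl_append, List.foldl_cons, List.foldl_nil, pvEmit]
  split_ifs <;> simp

lemma pvB_loop (lines : List String) :
    ∀ (gs : List (List String)) (cur : List String),
    pvBPhase2 ((lines.foldl pvBGroupStep (gs, cur)).1 ++ [(lines.foldl pvBGroupStep (gs, cur)).2]) =
      pvBPhase2 gs ++ pvProc (pvBRecord cur) lines := by
  induction lines with
  | nil => intro gs cur; simp [pvProc, pvBPhase2_append]
  | cons l rest ih =>
      intro gs cur
      by_cases h : PySem.Str.startswith l "  Font:" = true
      · simp only [List.foldl_cons, pvBGroupStep, if_pos h, pvProc, ih, pvBPhase2_append]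
        have : pvBRecord [l] =
            (PySem.Dict.empty : PySem.Dict String String).insert "name" (pvColonVal l) := by
          simp only [pvBRecord, List.foldl_cons, List.foldl_nil, pvBLineStep, if_pos h]
        rw [this, List.append_assoc]
      · simp only [List.foldl_cons, pvBGroupStep, if_neg h, pvProc, ih]
        have : pvBRecord (cur ++ [l]) = pvBLineStep (pvBRecord cur) l := by
          simp [pvBRecord]
        rw [this]

-- ===== VERDICT (by name: the statement is the Claim_ definition above) =====
theorem parse_font_details_spec : Claim_equal_parse_font_details := by
  intro output _
  show parse_font_details output = parse_font_details_alt output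
  unfold parse_font_details parse_font_details_alt
  dsimp only
  rw [pvA_loop (PySem.Str.splitlines output) [] PySem.Dict.empty,
      pvB_loop (PySem.Str.splitlines output) [] []]
  simp [pvBPhase2, pvBRecord]
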